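-- pv_equiv track=rewrite | github.com/Halildeu/autonomous-orchestrator | src/session/code_aware_index.py | _file_domain
-- ===== SOURCE A (Python) =====
-- def _file_domain(rel_path: str) -> str:
--     """Infer domain from file path."""
--     parts = rel_path.split("/")
--     if any(p in parts for p in ("backend",)):
--         return "backend"
--     if any(p in parts for p in ("web", "frontend")):
--         return "frontend"
--     if any(p in parts for p in ("schemas",)):
--         return "schema"
--     if any(p in parts for p in ("policies",)):
--         return "policy"
--     if any(p in parts for p in ("registry",)):
--         return "registry"
--     if any(p in parts for p in ("ci",)):
--         return "ci"
--     if any(p in parts for p in ("tests",)):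
--         return "test"
--     if any(p in parts for p in ("scripts",)):
--         return "script"
--     if any(p in parts for p in ("extensions",)):
--         return "extension"
--     if any(p in parts for p in ("src",)):
--         return "core"
--     return "other"
-- ===== SOURCE B (Python) =====
-- _KEYWORD_RANK = {
--     "backend": 0, "web": 1, "frontend": 1, "schemas": 2, "policies": 3,
--     "registry": 4, "ci": 5, "tests": 6, "scripts": 7, "extensions": 8, "src": 9,
-- }
-- _LABELS = ("backend", "frontend", "schema", "policy", "registry", "ci",
--            "test", "script", "extension", "core", "other")
--
-- def _file_domain(rel_path: str) -> str:
--     """Infer domain from file path."""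
--     best = 10
--     for part in rel_path.split("/"):
--         r = _KEYWORD_RANK.get(part, 10)
--         if r < best:
--             best = r
--     return _LABELS[best]
-- ===== Notes on version B (the rewrite author's own statement) =====
-- stated objective: alternative
-- what changed: Instead of A's keyword-by-keyword cascade of membership tests over the split path, B makes a single pass over the path segments, mapping each segment to a priority rank through a dict and keeping the minimum rank, then reads the label off a rank-indexed tuple.
import Mathlib
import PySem

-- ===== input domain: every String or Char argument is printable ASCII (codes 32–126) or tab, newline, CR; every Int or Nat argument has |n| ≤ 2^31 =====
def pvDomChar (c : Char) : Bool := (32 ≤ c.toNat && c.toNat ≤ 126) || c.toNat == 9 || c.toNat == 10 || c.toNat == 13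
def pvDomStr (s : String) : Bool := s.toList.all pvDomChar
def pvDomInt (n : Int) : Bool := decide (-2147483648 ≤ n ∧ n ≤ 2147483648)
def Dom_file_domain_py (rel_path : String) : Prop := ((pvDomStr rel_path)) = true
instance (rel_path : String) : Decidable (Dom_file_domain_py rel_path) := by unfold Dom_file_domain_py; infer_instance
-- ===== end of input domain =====

-- B replaces A's keyword-by-keyword membership cascade with one pass over the path
-- segments keeping the minimum priority rank found in a dict, then a rank-indexed
-- label table (objective: alternative traversal, same result).

-- ===== PORT A =====
def file_domain_py (rel_path : String) : String :=
  let parts := (PySem.Str.split? rel_path "/").getD []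
  if ["backend"].any (fun p => List.contains parts p) then "backend"
  else if ["web", "frontend"].any (fun p => List.contains parts p) then "frontend"
  else if ["schemas"].any (fun p => List.contains parts p) then "schema"
  else if ["policies"].any (fun p => List.contains parts p) then "policy"
  else if ["registry"].any (fun p => List.contains parts p) then "registry"
  else if ["ci"].any (fun p => List.contains parts p) then "ci"
  else if ["tests"].any (fun p => List.contains parts p) then "test"
  else if ["scripts"].any (fun p => List.contains parts p) then "script"
  else if ["extensions"].any (fun p => List.contains parts p) then "extension"
  else if ["src"].any (fun p => List.contains parts p) then "core"
  else "other"

-- ===== PORT B =====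
def kwRankTable : PySem.Dict String Int :=
  PySem.Dict.ofList
  [("backend", 0), ("web", 1), ("frontend", 1), ("schemas", 2), ("policies", 3),
   ("registry", 4), ("ci", 5), ("tests", 6), ("scripts", 7), ("extensions", 8), ("src", 9)]

def domainLabels : List String :=
  ["backend", "frontend", "schema", "policy", "registry", "ci",
   "test", "script", "extension", "core", "other"]

def file_domain_py_alt (rel_path : String) : String :=
  let parts := (PySem.Str.split? rel_path "/").getD []
  let best := parts.foldl
    (fun best part =>
      let r := PySem.Dict.getD kwRankTable part 10
      if r < best then r else best) (10 : Int)
  -- _LABELS[best]: best is always in 0..10, so pyGet? is `some`; getD "" only makes it total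
  (PySem.List.pyGet? domainLabels best).getD ""

-- ===== PRECONDITION & SPEC =====
def Spec_file_domain_py (rel_path : String) (out : String) : Prop := out = file_domain_py_alt rel_path
instance (rel_path : String) (out : String) : Decidable (Spec_file_domain_py rel_path out) := by unfold Spec_file_domain_py; infer_instance

-- ===== CLAIM (what is proved, stated in full; the proofs are below) =====
def Claim_equal_file_domain_py : Prop := ∀ (rel_path : String), Dom_file_domain_py rel_path → Spec_file_domain_py rel_path (file_domain_py rel_path)


-- ===== LEMMAS AND PROOFS =====

def kwRank (p : String) : Int := PySem.Dict.getD kwRankTable p 10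

def bestRank (parts : List String) : Int :=
  parts.foldl (fun best part => if kwRank part < best then kwRank part else best) 10

lemma kwRank_unfold (p : String) :
    kwRank p =
      if p = "backend" then 0 else if p = "web" then 1 else if p = "frontend" then 1
      else if p = "schemas" then 2 else if p = "policies" then 3 else if p = "registry" then 4
      else if p = "ci" then 5 else if p = "tests" then 6 else if p = "scripts" then 7
      else if p = "extensions" then 8 else if p = "src" then 9 else 10 := by
  by_cases h0 : p = "backend"
  · subst h0; decide
  by_cases h1 : p = "web"
  · subst h1; decide
  by_cases h2 : p = "frontend"
  · subst h2; decide
  by_cases h3 : p = "schemas"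
  · subst h3; decide
  by_cases h4 : p = "policies"
  · subst h4; decide
  by_cases h5 : p = "registry"
  · subst h5; decide
  by_cases h6 : p = "ci"
  · subst h6; decide
  by_cases h7 : p = "tests"
  · subst h7; decide
  by_cases h8 : p = "scripts"
  · subst h8; decide
  by_cases h9 : p = "extensions"
  · subst h9; decide
  by_cases h10 : p = "src"
  · subst h10; decide
  have h : kwRankTable = PySem.Dict.mk
      [("backend", 0), ("web", 1), ("frontend", 1), ("schemas", 2), ("policies", 3),
       ("registry", 4), ("ci", 5), ("tests", 6), ("scripts", 7), ("extensions", 8), ("src", 9)] := by decide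
  simp only [kwRank, h, PySem.Dict.getD_eq_get?_getD, PySem.Dict.get?_mk_cons, beq_iff_eq]
  simp [PySem.Dict.get?, h0, h1, h2, h3, h4, h5, h6, h7, h8, h9, h10,
        Ne.symm h0, Ne.symm h1, Ne.symm h2, Ne.symm h3, Ne.symm h4, Ne.symm h5,
        Ne.symm h6, Ne.symm h7, Ne.symm h8, Ne.symm h9, Ne.symm h10]

lemma kwRank_bounds (p : String) : 0 ≤ kwRank p ∧ kwRank p ≤ 10 := by
  rw [kwRank_unfold]
  by_cases h0 : p = "backend"
  · rw [if_pos h0]; norm_num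
  by_cases h1 : p = "web"
  · rw [if_neg h0, if_pos h1]; norm_num
  by_cases h2 : p = "frontend"
  · rw [if_neg h0, if_neg h1, if_pos h2]; norm_num
  by_cases h3 : p = "schemas"
  · rw [if_neg h0, if_neg h1, if_neg h2, if_pos h3]; norm_num
  by_cases h4 : p = "policies"
  · rw [if_neg h0, if_neg h1, if_neg h2, if_neg h3, if_pos h4]; norm_num
  by_cases h5 : p = "registry"
  · rw [if_neg h0, if_neg h1, if_neg h2, if_neg h3, if_neg h4, if_pos h5]; norm_num
  by_cases h6 : p = "ci"
  · rw [if_neg h0, if_neg h1, if_neg h2, if_neg h3, if_neg h4, if_neg h5, if_pos h6]; norm_num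
  by_cases h7 : p = "tests"
  · rw [if_neg h0, if_neg h1, if_neg h2, if_neg h3, if_neg h4, if_neg h5, if_neg h6, if_pos h7]; norm_num
  by_cases h8 : p = "scripts"
  · rw [if_neg h0, if_neg h1, if_neg h2, if_neg h3, if_neg h4, if_neg h5, if_neg h6, if_neg h7, if_pos h8]; norm_num
  by_cases h9 : p = "extensions"
  · rw [if_neg h0, if_neg h1, if_neg h2, if_neg h3, if_neg h4, if_neg h5, if_neg h6, if_neg h7, if_neg h8, if_pos h9]; norm_num
  by_cases h10 : p = "src"
  · rw [if_neg h0, if_neg h1, if_neg h2, if_neg h3, if_neg h4, if_neg h5, if_neg h6, if_neg h7, if_neg h8, if_neg h9, if_pos h10]; norm_num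
  rw [if_neg h0, if_neg h1, if_neg h2, if_neg h3, if_neg h4, if_neg h5, if_neg h6, if_neg h7, if_neg h8, if_neg h9, if_neg h10]; norm_num

lemma rank_le_0 (p : String) (h : kwRank p ≤ 0) : p = "backend" := by
  rw [kwRank_unfold] at h
  by_cases h0 : p = "backend"
  · exact h0
  by_cases h1 : p = "web"
  · rw [if_neg h0, if_pos h1] at h; exact absurd h (by norm_num)
  by_cases h2 : p = "frontend"
  · rw [if_neg h0, if_neg h1, if_pos h2] at h; exact absurd h (by norm_num)
  by_cases h3 : p = "schemas"
  · rw [if_neg h0, if_neg h1, if_neg h2, if_pos h3] at h; exact absurd h (by norm_num)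
  by_cases h4 : p = "policies"
  · rw [if_neg h0, if_neg h1, if_neg h2, if_neg h3, if_pos h4] at h; exact absurd h (by norm_num)
  by_cases h5 : p = "registry"
  · rw [if_neg h0, if_neg h1, if_neg h2, if_neg h3, if_neg h4, if_pos h5] at h; exact absurd h (by norm_num)
  by_cases h6 : p = "ci"
  · rw [if_neg h0, if_neg h1, if_neg h2, if_neg h3, if_neg h4, if_neg h5, if_pos h6] at h; exact absurd h (by norm_num)
  by_cases h7 : p = "tests"
  · rw [if_neg h0, if_neg h1, if_neg h2, if_neg h3, if_neg h4, if_neg h5, if_neg h6, if_pos h7] at h; exact absurd h (by norm_num)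
  by_cases h8 : p = "scripts"
  · rw [if_neg h0, if_neg h1, if_neg h2, if_neg h3, if_neg h4, if_neg h5, if_neg h6, if_neg h7, if_pos h8] at h; exact absurd h (by norm_num)
  by_cases h9 : p = "extensions"
  · rw [if_neg h0, if_neg h1, if_neg h2, if_neg h3, if_neg h4, if_neg h5, if_neg h6, if_neg h7, if_neg h8, if_pos h9] at h; exact absurd h (by norm_num)
  by_cases h10 : p = "src"
  · rw [if_neg h0, if_neg h1, if_neg h2, if_neg h3, if_neg h4, if_neg h5, if_neg h6, if_neg h7, if_neg h8, if_neg h9, if_pos h10] at h; exact absurd h (by norm_num)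
  rw [if_neg h0, if_neg h1, if_neg h2, if_neg h3, if_neg h4, if_neg h5, if_neg h6, if_neg h7, if_neg h8, if_neg h9, if_neg h10] at h; exact absurd h (by norm_num)

lemma rank_le_1 (p : String) (h : kwRank p ≤ 1) : p = "backend" ∨ p = "web" ∨ p = "frontend" := by
  rw [kwRank_unfold] at h
  by_cases h0 : p = "backend"
  · exact Or.inl h0
  by_cases h1 : p = "web"
  · exact Or.inr (Or.inl h1)
  by_cases h2 : p = "frontend"
  · exact Or.inr (Or.inr (h2))
  by_cases h3 : p = "schemas"
  · rw [if_neg h0, if_neg h1, if_neg h2, if_pos h3] at h; exact absurd h (by norm_num)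
  by_cases h4 : p = "policies"
  · rw [if_neg h0, if_neg h1, if_neg h2, if_neg h3, if_pos h4] at h; exact absurd h (by norm_num)
  by_cases h5 : p = "registry"
  · rw [if_neg h0, if_neg h1, if_neg h2, if_neg h3, if_neg h4, if_pos h5] at h; exact absurd h (by norm_num)
  by_cases h6 : p = "ci"
  · rw [if_neg h0, if_neg h1, if_neg h2, if_neg h3, if_neg h4, if_neg h5, if_pos h6] at h; exact absurd h (by norm_num)
  by_cases h7 : p = "tests"
  · rw [if_neg h0, if_neg h1, if_neg h2, if_neg h3, if_neg h4, if_neg h5, if_neg h6, if_pos h7] at h; exact absurd h (by norm_num)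
  by_cases h8 : p = "scripts"
  · rw [if_neg h0, if_neg h1, if_neg h2, if_neg h3, if_neg h4, if_neg h5, if_neg h6, if_neg h7, if_pos h8] at h; exact absurd h (by norm_num)
  by_cases h9 : p = "extensions"
  · rw [if_neg h0, if_neg h1, if_neg h2, if_neg h3, if_neg h4, if_neg h5, if_neg h6, if_neg h7, if_neg h8, if_pos h9] at h; exact absurd h (by norm_num)
  by_cases h10 : p = "src"
  · rw [if_neg h0, if_neg h1, if_neg h2, if_neg h3, if_neg h4, if_neg h5, if_neg h6, if_neg h7, if_neg h8, if_neg h9, if_pos h10] at h; exact absurd h (by norm_num)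
  rw [if_neg h0, if_neg h1, if_neg h2, if_neg h3, if_neg h4, if_neg h5, if_neg h6, if_neg h7, if_neg h8, if_neg h9, if_neg h10] at h; exact absurd h (by norm_num)

lemma rank_le_2 (p : String) (h : kwRank p ≤ 2) : p = "backend" ∨ p = "web" ∨ p = "frontend" ∨ p = "schemas" := by
  rw [kwRank_unfold] at h
  by_cases h0 : p = "backend"
  · exact Or.inl h0
  by_cases h1 : p = "web"
  · exact Or.inr (Or.inl h1)
  by_cases h2 : p = "frontend"
  · exact Or.inr (Or.inr (Or.inl h2))
  by_cases h3 : p = "schemas"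
  · exact Or.inr (Or.inr (Or.inr (h3)))
  by_cases h4 : p = "policies"
  · rw [if_neg h0, if_neg h1, if_neg h2, if_neg h3, if_pos h4] at h; exact absurd h (by norm_num)
  by_cases h5 : p = "registry"
  · rw [if_neg h0, if_neg h1, if_neg h2, if_neg h3, if_neg h4, if_pos h5] at h; exact absurd h (by norm_num)
  by_cases h6 : p = "ci"
  · rw [if_neg h0, if_neg h1, if_neg h2, if_neg h3, if_neg h4, if_neg h5, if_pos h6] at h; exact absurd h (by norm_num)
  by_cases h7 : p = "tests"
  · rw [if_neg h0, if_neg h1, if_neg h2, if_neg h3, if_neg h4, if_neg h5, if_neg h6, if_pos h7] at h; exact absurd h (by norm_num)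
  by_cases h8 : p = "scripts"
  · rw [if_neg h0, if_neg h1, if_neg h2, if_neg h3, if_neg h4, if_neg h5, if_neg h6, if_neg h7, if_pos h8] at h; exact absurd h (by norm_num)
  by_cases h9 : p = "extensions"
  · rw [if_neg h0, if_neg h1, if_neg h2, if_neg h3, if_neg h4, if_neg h5, if_neg h6, if_neg h7, if_neg h8, if_pos h9] at h; exact absurd h (by norm_num)
  by_cases h10 : p = "src"
  · rw [if_neg h0, if_neg h1, if_neg h2, if_neg h3, if_neg h4, if_neg h5, if_neg h6, if_neg h7, if_neg h8, if_neg h9, if_pos h10] at h; exact absurd h (by norm_num)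
  rw [if_neg h0, if_neg h1, if_neg h2, if_neg h3, if_neg h4, if_neg h5, if_neg h6, if_neg h7, if_neg h8, if_neg h9, if_neg h10] at h; exact absurd h (by norm_num)

lemma rank_le_3 (p : String) (h : kwRank p ≤ 3) : p = "backend" ∨ p = "web" ∨ p = "frontend" ∨ p = "schemas" ∨ p = "policies" := by
  rw [kwRank_unfold] at h
  by_cases h0 : p = "backend"
  · exact Or.inl h0
  by_cases h1 : p = "web"
  · exact Or.inr (Or.inl h1)
  by_cases h2 : p = "frontend"
  · exact Or.inr (Or.inr (Or.inl h2))
  by_cases h3 : p = "schemas"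
  · exact Or.inr (Or.inr (Or.inr (Or.inl h3)))
  by_cases h4 : p = "policies"
  · exact Or.inr (Or.inr (Or.inr (Or.inr (h4))))
  by_cases h5 : p = "registry"
  · rw [if_neg h0, if_neg h1, if_neg h2, if_neg h3, if_neg h4, if_pos h5] at h; exact absurd h (by norm_num)
  by_cases h6 : p = "ci"
  · rw [if_neg h0, if_neg h1, if_neg h2, if_neg h3, if_neg h4, if_neg h5, if_pos h6] at h; exact absurd h (by norm_num)
  by_cases h7 : p = "tests"
  · rw [if_neg h0, if_neg h1, if_neg h2, if_neg h3, if_neg h4, if_neg h5, if_neg h6, if_pos h7] at h; exact absurd h (by norm_num)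
  by_cases h8 : p = "scripts"
  · rw [if_neg h0, if_neg h1, if_neg h2, if_neg h3, if_neg h4, if_neg h5, if_neg h6, if_neg h7, if_pos h8] at h; exact absurd h (by norm_num)
  by_cases h9 : p = "extensions"
  · rw [if_neg h0, if_neg h1, if_neg h2, if_neg h3, if_neg h4, if_neg h5, if_neg h6, if_neg h7, if_neg h8, if_pos h9] at h; exact absurd h (by norm_num)
  by_cases h10 : p = "src"
  · rw [if_neg h0, if_neg h1, if_neg h2, if_neg h3, if_neg h4, if_neg h5, if_neg h6, if_neg h7, if_neg h8, if_neg h9, if_pos h10] at h; exact absurd h (by norm_num)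
  rw [if_neg h0, if_neg h1, if_neg h2, if_neg h3, if_neg h4, if_neg h5, if_neg h6, if_neg h7, if_neg h8, if_neg h9, if_neg h10] at h; exact absurd h (by norm_num)

lemma rank_le_4 (p : String) (h : kwRank p ≤ 4) : p = "backend" ∨ p = "web" ∨ p = "frontend" ∨ p = "schemas" ∨ p = "policies" ∨ p = "registry" := by
  rw [kwRank_unfold] at h
  by_cases h0 : p = "backend"
  · exact Or.inl h0
  by_cases h1 : p = "web"
  · exact Or.inr (Or.inl h1)
  by_cases h2 : p = "frontend"
  · exact Or.inr (Or.inr (Or.inl h2))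
  by_cases h3 : p = "schemas"
  · exact Or.inr (Or.inr (Or.inr (Or.inl h3)))
  by_cases h4 : p = "policies"
  · exact Or.inr (Or.inr (Or.inr (Or.inr (Or.inl h4))))
  by_cases h5 : p = "registry"
  · exact Or.inr (Or.inr (Or.inr (Or.inr (Or.inr (h5)))))
  by_cases h6 : p = "ci"
  · rw [if_neg h0, if_neg h1, if_neg h2, if_neg h3, if_neg h4, if_neg h5, if_pos h6] at h; exact absurd h (by norm_num)
  by_cases h7 : p = "tests"
  · rw [if_neg h0, if_neg h1, if_neg h2, if_neg h3, if_neg h4, if_neg h5, if_neg h6, if_pos h7] at h; exact absurd h (by norm_num)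
  by_cases h8 : p = "scripts"
  · rw [if_neg h0, if_neg h1, if_neg h2, if_neg h3, if_neg h4, if_neg h5, if_neg h6, if_neg h7, if_pos h8] at h; exact absurd h (by norm_num)
  by_cases h9 : p = "extensions"
  · rw [if_neg h0, if_neg h1, if_neg h2, if_neg h3, if_neg h4, if_neg h5, if_neg h6, if_neg h7, if_neg h8, if_pos h9] at h; exact absurd h (by norm_num)
  by_cases h10 : p = "src"
  · rw [if_neg h0, if_neg h1, if_neg h2, if_neg h3, if_neg h4, if_neg h5, if_neg h6, if_neg h7, if_neg h8, if_neg h9, if_pos h10] at h; exact absurd h (by norm_num)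
  rw [if_neg h0, if_neg h1, if_neg h2, if_neg h3, if_neg h4, if_neg h5, if_neg h6, if_neg h7, if_neg h8, if_neg h9, if_neg h10] at h; exact absurd h (by norm_num)

lemma rank_le_5 (p : String) (h : kwRank p ≤ 5) : p = "backend" ∨ p = "web" ∨ p = "frontend" ∨ p = "schemas" ∨ p = "policies" ∨ p = "registry" ∨ p = "ci" := by
  rw [kwRank_unfold] at h
  by_cases h0 : p = "backend"
  · exact Or.inl h0
  by_cases h1 : p = "web"
  · exact Or.inr (Or.inl h1)
  by_cases h2 : p = "frontend"
  · exact Or.inr (Or.inr (Or.inl h2))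
  by_cases h3 : p = "schemas"
  · exact Or.inr (Or.inr (Or.inr (Or.inl h3)))
  by_cases h4 : p = "policies"
  · exact Or.inr (Or.inr (Or.inr (Or.inr (Or.inl h4))))
  by_cases h5 : p = "registry"
  · exact Or.inr (Or.inr (Or.inr (Or.inr (Or.inr (Or.inl h5)))))
  by_cases h6 : p = "ci"
  · exact Or.inr (Or.inr (Or.inr (Or.inr (Or.inr (Or.inr (h6))))))
  by_cases h7 : p = "tests"
  · rw [if_neg h0, if_neg h1, if_neg h2, if_neg h3, if_neg h4, if_neg h5, if_neg h6, if_pos h7] at h; exact absurd h (by norm_num)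
  by_cases h8 : p = "scripts"
  · rw [if_neg h0, if_neg h1, if_neg h2, if_neg h3, if_neg h4, if_neg h5, if_neg h6, if_neg h7, if_pos h8] at h; exact absurd h (by norm_num)
  by_cases h9 : p = "extensions"
  · rw [if_neg h0, if_neg h1, if_neg h2, if_neg h3, if_neg h4, if_neg h5, if_neg h6, if_neg h7, if_neg h8, if_pos h9] at h; exact absurd h (by norm_num)
  by_cases h10 : p = "src"
  · rw [if_neg h0, if_neg h1, if_neg h2, if_neg h3, if_neg h4, if_neg h5, if_neg h6, if_neg h7, if_neg h8, if_neg h9, if_pos h10] at h; exact absurd h (by norm_num)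
  rw [if_neg h0, if_neg h1, if_neg h2, if_neg h3, if_neg h4, if_neg h5, if_neg h6, if_neg h7, if_neg h8, if_neg h9, if_neg h10] at h; exact absurd h (by norm_num)

lemma rank_le_6 (p : String) (h : kwRank p ≤ 6) : p = "backend" ∨ p = "web" ∨ p = "frontend" ∨ p = "schemas" ∨ p = "policies" ∨ p = "registry" ∨ p = "ci" ∨ p = "tests" := by
  rw [kwRank_unfold] at h
  by_cases h0 : p = "backend"
  · exact Or.inl h0
  by_cases h1 : p = "web"
  · exact Or.inr (Or.inl h1)
  by_cases h2 : p = "frontend"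
  · exact Or.inr (Or.inr (Or.inl h2))
  by_cases h3 : p = "schemas"
  · exact Or.inr (Or.inr (Or.inr (Or.inl h3)))
  by_cases h4 : p = "policies"
  · exact Or.inr (Or.inr (Or.inr (Or.inr (Or.inl h4))))
  by_cases h5 : p = "registry"
  · exact Or.inr (Or.inr (Or.inr (Or.inr (Or.inr (Or.inl h5)))))
  by_cases h6 : p = "ci"
  · exact Or.inr (Or.inr (Or.inr (Or.inr (Or.inr (Or.inr (Or.inl h6))))))
  by_cases h7 : p = "tests"
  · exact Or.inr (Or.inr (Or.inr (Or.inr (Or.inr (Or.inr (Or.inr (h7)))))))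
  by_cases h8 : p = "scripts"
  · rw [if_neg h0, if_neg h1, if_neg h2, if_neg h3, if_neg h4, if_neg h5, if_neg h6, if_neg h7, if_pos h8] at h; exact absurd h (by norm_num)
  by_cases h9 : p = "extensions"
  · rw [if_neg h0, if_neg h1, if_neg h2, if_neg h3, if_neg h4, if_neg h5, if_neg h6, if_neg h7, if_neg h8, if_pos h9] at h; exact absurd h (by norm_num)
  by_cases h10 : p = "src"
  · rw [if_neg h0, if_neg h1, if_neg h2, if_neg h3, if_neg h4, if_neg h5, if_neg h6, if_neg h7, if_neg h8, if_neg h9, if_pos h10] at h; exact absurd h (by norm_num)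
  rw [if_neg h0, if_neg h1, if_neg h2, if_neg h3, if_neg h4, if_neg h5, if_neg h6, if_neg h7, if_neg h8, if_neg h9, if_neg h10] at h; exact absurd h (by norm_num)

lemma rank_le_7 (p : String) (h : kwRank p ≤ 7) : p = "backend" ∨ p = "web" ∨ p = "frontend" ∨ p = "schemas" ∨ p = "policies" ∨ p = "registry" ∨ p = "ci" ∨ p = "tests" ∨ p = "scripts" := by
  rw [kwRank_unfold] at h
  by_cases h0 : p = "backend"
  · exact Or.inl h0
  by_cases h1 : p = "web"
  · exact Or.inr (Or.inl h1)
  by_cases h2 : p = "frontend"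
  · exact Or.inr (Or.inr (Or.inl h2))
  by_cases h3 : p = "schemas"
  · exact Or.inr (Or.inr (Or.inr (Or.inl h3)))
  by_cases h4 : p = "policies"
  · exact Or.inr (Or.inr (Or.inr (Or.inr (Or.inl h4))))
  by_cases h5 : p = "registry"
  · exact Or.inr (Or.inr (Or.inr (Or.inr (Or.inr (Or.inl h5)))))
  by_cases h6 : p = "ci"
  · exact Or.inr (Or.inr (Or.inr (Or.inr (Or.inr (Or.inr (Or.inl h6))))))
  by_cases h7 : p = "tests"
  · exact Or.inr (Or.inr (Or.inr (Or.inr (Or.inr (Or.inr (Or.inr (Or.inl h7)))))))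
  by_cases h8 : p = "scripts"
  · exact Or.inr (Or.inr (Or.inr (Or.inr (Or.inr (Or.inr (Or.inr (Or.inr (h8))))))))
  by_cases h9 : p = "extensions"
  · rw [if_neg h0, if_neg h1, if_neg h2, if_neg h3, if_neg h4, if_neg h5, if_neg h6, if_neg h7, if_neg h8, if_pos h9] at h; exact absurd h (by norm_num)
  by_cases h10 : p = "src"
  · rw [if_neg h0, if_neg h1, if_neg h2, if_neg h3, if_neg h4, if_neg h5, if_neg h6, if_neg h7, if_neg h8, if_neg h9, if_pos h10] at h; exact absurd h (by norm_num)
  rw [if_neg h0, if_neg h1, if_neg h2, if_neg h3, if_neg h4, if_neg h5, if_neg h6, if_neg h7, if_neg h8, if_neg h9, if_neg h10] at h; exact absurd h (by norm_num)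

lemma rank_le_8 (p : String) (h : kwRank p ≤ 8) : p = "backend" ∨ p = "web" ∨ p = "frontend" ∨ p = "schemas" ∨ p = "policies" ∨ p = "registry" ∨ p = "ci" ∨ p = "tests" ∨ p = "scripts" ∨ p = "extensions" := by
  rw [kwRank_unfold] at h
  by_cases h0 : p = "backend"
  · exact Or.inl h0
  by_cases h1 : p = "web"
  · exact Or.inr (Or.inl h1)
  by_cases h2 : p = "frontend"
  · exact Or.inr (Or.inr (Or.inl h2))
  by_cases h3 : p = "schemas"
  · exact Or.inr (Or.inr (Or.inr (Or.inl h3)))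
  by_cases h4 : p = "policies"
  · exact Or.inr (Or.inr (Or.inr (Or.inr (Or.inl h4))))
  by_cases h5 : p = "registry"
  · exact Or.inr (Or.inr (Or.inr (Or.inr (Or.inr (Or.inl h5)))))
  by_cases h6 : p = "ci"
  · exact Or.inr (Or.inr (Or.inr (Or.inr (Or.inr (Or.inr (Or.inl h6))))))
  by_cases h7 : p = "tests"
  · exact Or.inr (Or.inr (Or.inr (Or.inr (Or.inr (Or.inr (Or.inr (Or.inl h7)))))))
  by_cases h8 : p = "scripts"
  · exact Or.inr (Or.inr (Or.inr (Or.inr (Or.inr (Or.inr (Or.inr (Or.inr (Or.inl h8))))))))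
  by_cases h9 : p = "extensions"
  · exact Or.inr (Or.inr (Or.inr (Or.inr (Or.inr (Or.inr (Or.inr (Or.inr (Or.inr (h9)))))))))
  by_cases h10 : p = "src"
  · rw [if_neg h0, if_neg h1, if_neg h2, if_neg h3, if_neg h4, if_neg h5, if_neg h6, if_neg h7, if_neg h8, if_neg h9, if_pos h10] at h; exact absurd h (by norm_num)
  rw [if_neg h0, if_neg h1, if_neg h2, if_neg h3, if_neg h4, if_neg h5, if_neg h6, if_neg h7, if_neg h8, if_neg h9, if_neg h10] at h; exact absurd h (by norm_num)

lemma rank_le_9 (p : String) (h : kwRank p ≤ 9) : p = "backend" ∨ p = "web" ∨ p = "frontend" ∨ p = "schemas" ∨ p = "policies" ∨ p = "registry" ∨ p = "ci" ∨ p = "tests" ∨ p = "scripts" ∨ p = "extensions" ∨ p = "src" := by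
  rw [kwRank_unfold] at h
  by_cases h0 : p = "backend"
  · exact Or.inl h0
  by_cases h1 : p = "web"
  · exact Or.inr (Or.inl h1)
  by_cases h2 : p = "frontend"
  · exact Or.inr (Or.inr (Or.inl h2))
  by_cases h3 : p = "schemas"
  · exact Or.inr (Or.inr (Or.inr (Or.inl h3)))
  by_cases h4 : p = "policies"
  · exact Or.inr (Or.inr (Or.inr (Or.inr (Or.inl h4))))
  by_cases h5 : p = "registry"
  · exact Or.inr (Or.inr (Or.inr (Or.inr (Or.inr (Or.inl h5)))))
  by_cases h6 : p = "ci"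
  · exact Or.inr (Or.inr (Or.inr (Or.inr (Or.inr (Or.inr (Or.inl h6))))))
  by_cases h7 : p = "tests"
  · exact Or.inr (Or.inr (Or.inr (Or.inr (Or.inr (Or.inr (Or.inr (Or.inl h7)))))))
  by_cases h8 : p = "scripts"
  · exact Or.inr (Or.inr (Or.inr (Or.inr (Or.inr (Or.inr (Or.inr (Or.inr (Or.inl h8))))))))
  by_cases h9 : p = "extensions"
  · exact Or.inr (Or.inr (Or.inr (Or.inr (Or.inr (Or.inr (Or.inr (Or.inr (Or.inr (Or.inl h9)))))))))
  by_cases h10 : p = "src"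
  · exact Or.inr (Or.inr (Or.inr (Or.inr (Or.inr (Or.inr (Or.inr (Or.inr (Or.inr (Or.inr (h10))))))))))
  rw [if_neg h0, if_neg h1, if_neg h2, if_neg h3, if_neg h4, if_neg h5, if_neg h6, if_neg h7, if_neg h8, if_neg h9, if_neg h10] at h; exact absurd h (by norm_num)

lemma bestRank_le_iff (parts : List String) (k : Int) :
    bestRank parts ≤ k ↔ (10 : Int) ≤ k ∨ ∃ p ∈ parts, kwRank p ≤ k := by
  unfold bestRank
  generalize (10 : Int) = b
  induction parts generalizing b with
  | nil => simp
  | cons x xs ih =>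
    simp only [List.foldl_cons, ih]
    constructor
    · rintro (h | ⟨p, hp, hpk⟩)
      · by_cases hx : kwRank x < b
        · simp [hx] at h; exact Or.inr ⟨x, by simp, h⟩
        · simp [hx] at h; exact Or.inl h
      · exact Or.inr ⟨p, by simp [hp], hpk⟩
    · rintro (h | ⟨p, hp, hpk⟩)
      · left; split <;> omega
      · rcases List.mem_cons.mp hp with rfl | hp'
        · left; split <;> omega
        · exact Or.inr ⟨p, hp', hpk⟩

lemma bestRank_nonneg (parts : List String) : 0 ≤ bestRank parts := by
  unfold bestRank
  generalize hb : (10 : Int) = b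
  have hb0 : 0 ≤ b := by omega
  clear hb
  induction parts generalizing b with
  | nil => simpa
  | cons x xs ih =>
    simp only [List.foldl_cons]
    apply ih
    have := (kwRank_bounds x).1
    split <;> omega

lemma bestRank_le_ten (parts : List String) : bestRank parts ≤ 10 :=
  (bestRank_le_iff parts 10).mpr (Or.inl le_rfl)

lemma bestRank_le_of_mem (parts : List String) (p : String) (hp : p ∈ parts) :
    bestRank parts ≤ kwRank p :=
  (bestRank_le_iff parts _).mpr (Or.inr ⟨p, hp, le_rfl⟩)

lemma kwRank_eval :
    kwRank "backend" = 0 ∧ kwRank "web" = 1 ∧ kwRank "frontend" = 1 ∧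
    kwRank "schemas" = 2 ∧ kwRank "policies" = 3 ∧ kwRank "registry" = 4 ∧
    kwRank "ci" = 5 ∧ kwRank "tests" = 6 ∧ kwRank "scripts" = 7 ∧
    kwRank "extensions" = 8 ∧ kwRank "src" = 9 := by
  refine ⟨?_, ?_, ?_, ?_, ?_, ?_, ?_, ?_, ?_, ?_, ?_⟩ <;> decide

theorem file_domain_eq (rel_path : String) :
    file_domain_py rel_path = file_domain_py_alt rel_path := by
  unfold file_domain_py file_domain_py_alt
  simp only [List.any_cons, List.any_nil, Bool.or_false, List.contains_iff_mem, Bool.or_eq_true]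
  set parts := (PySem.Str.split? rel_path "/").getD [] with hparts
  have hR : parts.foldl
      (fun best part =>
        if PySem.Dict.getD kwRankTable part 10 < best then PySem.Dict.getD kwRankTable part 10
        else best) (10 : Int) = bestRank parts := rfl
  rw [hR]
  obtain ⟨e0, e1, e1', e2, e3, e4, e5, e6, e7, e8, e9⟩ := kwRank_eval
  have hnn := bestRank_nonneg parts
  have hle := bestRank_le_ten parts
  have key : ∀ k : Int, 0 ≤ k → k < 10 →
      (bestRank parts ≤ k ↔ ∃ p ∈ parts, kwRank p ≤ k) := by
    intro k h0 h10
    rw [bestRank_le_iff]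
    constructor
    · rintro (h | h); · omega
      · exact h
    · exact Or.inr
  split_ifs with b0 b1 b2 b3 b4 b5 b6 b7 b8 b9
  · -- branch: bestRank = 0
    have hub : bestRank parts ≤ 0 := by
      have := bestRank_le_of_mem parts _ b0; omega
    rw [show bestRank parts = 0 by omega]; decide
  · -- branch: bestRank = 1
    have hub : bestRank parts ≤ 1 := by
      rcases b1 with h | h
      · have := bestRank_le_of_mem parts _ h; omega
      · have := bestRank_le_of_mem parts _ h; omega
    have hlb : ¬ bestRank parts ≤ 0 := by
      rw [key 0 (by norm_num) (by norm_num)]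
      rintro ⟨p, hp, hle⟩
      rcases rank_le_0 p hle with rfl
      · exact b0 hp
    rw [show bestRank parts = 1 by omega]; decide
  · -- branch: bestRank = 2
    have hub : bestRank parts ≤ 2 := by
      have := bestRank_le_of_mem parts _ b2; omega
    have hlb : ¬ bestRank parts ≤ 1 := by
      rw [key 1 (by norm_num) (by norm_num)]
      rintro ⟨p, hp, hle⟩
      rcases rank_le_1 p hle with rfl|rfl|rfl
      · exact b0 hp
      · exact b1 (Or.inl hp)
      · exact b1 (Or.inr hp)
    rw [show bestRank parts = 2 by omega]; decide
  · -- branch: bestRank = 3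
    have hub : bestRank parts ≤ 3 := by
      have := bestRank_le_of_mem parts _ b3; omega
    have hlb : ¬ bestRank parts ≤ 2 := by
      rw [key 2 (by norm_num) (by norm_num)]
      rintro ⟨p, hp, hle⟩
      rcases rank_le_2 p hle with rfl|rfl|rfl|rfl
      · exact b0 hp
      · exact b1 (Or.inl hp)
      · exact b1 (Or.inr hp)
      · exact b2 hp
    rw [show bestRank parts = 3 by omega]; decide
  · -- branch: bestRank = 4
    have hub : bestRank parts ≤ 4 := by
      have := bestRank_le_of_mem parts _ b4; omega
    have hlb : ¬ bestRank parts ≤ 3 := by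
      rw [key 3 (by norm_num) (by norm_num)]
      rintro ⟨p, hp, hle⟩
      rcases rank_le_3 p hle with rfl|rfl|rfl|rfl|rfl
      · exact b0 hp
      · exact b1 (Or.inl hp)
      · exact b1 (Or.inr hp)
      · exact b2 hp
      · exact b3 hp
    rw [show bestRank parts = 4 by omega]; decide
  · -- branch: bestRank = 5
    have hub : bestRank parts ≤ 5 := by
      have := bestRank_le_of_mem parts _ b5; omega
    have hlb : ¬ bestRank parts ≤ 4 := by
      rw [key 4 (by norm_num) (by norm_num)]
      rintro ⟨p, hp, hle⟩
      rcases rank_le_4 p hle with rfl|rfl|rfl|rfl|rfl|rfl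
      · exact b0 hp
      · exact b1 (Or.inl hp)
      · exact b1 (Or.inr hp)
      · exact b2 hp
      · exact b3 hp
      · exact b4 hp
    rw [show bestRank parts = 5 by omega]; decide
  · -- branch: bestRank = 6
    have hub : bestRank parts ≤ 6 := by
      have := bestRank_le_of_mem parts _ b6; omega
    have hlb : ¬ bestRank parts ≤ 5 := by
      rw [key 5 (by norm_num) (by norm_num)]
      rintro ⟨p, hp, hle⟩
      rcases rank_le_5 p hle with rfl|rfl|rfl|rfl|rfl|rfl|rfl
      · exact b0 hp
      · exact b1 (Or.inl hp)
      · exact b1 (Or.inr hp)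
      · exact b2 hp
      · exact b3 hp
      · exact b4 hp
      · exact b5 hp
    rw [show bestRank parts = 6 by omega]; decide
  · -- branch: bestRank = 7
    have hub : bestRank parts ≤ 7 := by
      have := bestRank_le_of_mem parts _ b7; omega
    have hlb : ¬ bestRank parts ≤ 6 := by
      rw [key 6 (by norm_num) (by norm_num)]
      rintro ⟨p, hp, hle⟩
      rcases rank_le_6 p hle with rfl|rfl|rfl|rfl|rfl|rfl|rfl|rfl
      · exact b0 hp
      · exact b1 (Or.inl hp)
      · exact b1 (Or.inr hp)
      · exact b2 hp
      · exact b3 hp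
      · exact b4 hp
      · exact b5 hp
      · exact b6 hp
    rw [show bestRank parts = 7 by omega]; decide
  · -- branch: bestRank = 8
    have hub : bestRank parts ≤ 8 := by
      have := bestRank_le_of_mem parts _ b8; omega
    have hlb : ¬ bestRank parts ≤ 7 := by
      rw [key 7 (by norm_num) (by norm_num)]
      rintro ⟨p, hp, hle⟩
      rcases rank_le_7 p hle with rfl|rfl|rfl|rfl|rfl|rfl|rfl|rfl|rfl
      · exact b0 hp
      · exact b1 (Or.inl hp)
      · exact b1 (Or.inr hp)
      · exact b2 hp
      · exact b3 hp
      · exact b4 hp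
      · exact b5 hp
      · exact b6 hp
      · exact b7 hp
    rw [show bestRank parts = 8 by omega]; decide
  · -- branch: bestRank = 9
    have hub : bestRank parts ≤ 9 := by
      have := bestRank_le_of_mem parts _ b9; omega
    have hlb : ¬ bestRank parts ≤ 8 := by
      rw [key 8 (by norm_num) (by norm_num)]
      rintro ⟨p, hp, hle⟩
      rcases rank_le_8 p hle with rfl|rfl|rfl|rfl|rfl|rfl|rfl|rfl|rfl|rfl
      · exact b0 hp
      · exact b1 (Or.inl hp)
      · exact b1 (Or.inr hp)
      · exact b2 hp
      · exact b3 hp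
      · exact b4 hp
      · exact b5 hp
      · exact b6 hp
      · exact b7 hp
      · exact b8 hp
    rw [show bestRank parts = 9 by omega]; decide
  · -- branch: bestRank = 10
    have hlb : ¬ bestRank parts ≤ 9 := by
      rw [key 9 (by norm_num) (by norm_num)]
      rintro ⟨p, hp, hle⟩
      rcases rank_le_9 p hle with rfl|rfl|rfl|rfl|rfl|rfl|rfl|rfl|rfl|rfl|rfl
      · exact b0 hp
      · exact b1 (Or.inl hp)
      · exact b1 (Or.inr hp)
      · exact b2 hp
      · exact b3 hp
      · exact b4 hp
      · exact b5 hp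
      · exact b6 hp
      · exact b7 hp
      · exact b8 hp
      · exact b9 hp
    rw [show bestRank parts = 10 by omega]; decide

-- ===== VERDICT (by name: the statement is the Claim_ definition above) =====
theorem file_domain_py_spec : Claim_equal_file_domain_py := by
  intro rel_path _
  exact file_domain_eq rel_path
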